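-- pv_equiv track=rewrite | github.com/NathanGao97/ECE590 | HW7/main.py | recurDisparity
-- ===== SOURCE A (Python) =====
-- def partC(skiers, skis):
--     if len(skiers) != len(skis):
--         raise Exception('Invalid inputs: the number of skiers and skis are not equal!')
--     length = len(skiers)
--     disparity = 0
--     for i in range(length):
--         disparity += abs(skiers[i] - skis[i])
--     return disparity
--
-- def recurDisparity(skiers, skis):
--     n = len(skiers)
--     m = len(skis)
--     if n == 0:
--         return 0
--     elif n == m:
--         return partC(skiers, skis)
--     else:
--         choice1 = abs(skiers[n - 1] - skis[m - 1]) + recurDisparity(skiers[0:n - 1], skis[0:m - 1])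
--         choice2 = recurDisparity(skiers, skis[0:m - 1])
--         return min(choice1, choice2)
-- ===== SOURCE B (Python) =====
-- def recurDisparity(skiers, skis):
--     # Banded DP over prefix lengths: skier i can only take ski j with i <= j <= i + (m - n).
--     # d holds the forced diagonal dp[i][i]; band[t-1] holds dp[i][i+t] for t = 1..g, updated in place.
--     n = len(skiers)
--     m = len(skis)
--     if n > m:
--         raise ValueError('more skiers than skis')
--     g = m - n
--     d = 0
--     band = [0] * g
--     for i in range(1, n + 1):
--         a = skiers[i - 1]
--         d += abs(a - skis[i - 1])
--         u = d
--         for t in range(1, g + 1):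
--             v = band[t - 1] + abs(a - skis[i - 1 + t])
--             if v < u:
--                 u = v
--             band[t - 1] = u
--     return band[g - 1] if g else d
-- ===== Notes on version B (the rewrite author's own statement) =====
-- stated objective: alternative
-- what changed: Replaced A's branching recursion over list slices by an iterative banded dynamic program over prefix lengths that keeps only the g+1 = len(skis)-len(skiers)+1 reachable diagonal entries of each DP row, updated in place.
import Mathlib
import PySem

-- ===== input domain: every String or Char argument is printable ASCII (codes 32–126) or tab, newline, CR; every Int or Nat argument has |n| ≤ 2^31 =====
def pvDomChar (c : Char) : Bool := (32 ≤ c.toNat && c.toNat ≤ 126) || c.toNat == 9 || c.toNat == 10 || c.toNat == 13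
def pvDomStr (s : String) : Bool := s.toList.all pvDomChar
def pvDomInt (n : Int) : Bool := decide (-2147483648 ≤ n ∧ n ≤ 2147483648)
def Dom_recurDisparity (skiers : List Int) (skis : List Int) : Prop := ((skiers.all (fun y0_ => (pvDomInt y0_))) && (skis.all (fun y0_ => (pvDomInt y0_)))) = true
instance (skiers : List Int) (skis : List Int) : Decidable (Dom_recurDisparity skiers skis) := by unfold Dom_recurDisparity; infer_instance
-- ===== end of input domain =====

-- B replaces A's branching recursion over list slices by an iterative banded DP over prefix lengths, keeping one in-place row of the m-n+1 reachable diagonal entries (objective: alternative).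

-- ===== PORT A =====
-- partC: Python raises when lengths differ, but A only calls it on equal lengths; the 0 arm is that raise (outside any call A makes).
-- skiers[i] for i in range(len) is in range, so List.getD is exact here.
def partC (skiers : List Int) (skis : List Int) : Int :=
  if skiers.length ≠ skis.length then 0
  else (List.range skiers.length).foldl (fun d i => d + |skiers.getD i 0 - skis.getD i 0|) 0

-- xs[0:k] with 0 ≤ k ≤ len xs is exactly List.take k.  The `m = 0` arm is where Python raises
-- IndexError (skis[-1] on []); it is a totality guard only, outside Pre_.
def recurDisparity (skiers : List Int) (skis : List Int) : Int :=
  if skiers.length = 0 then 0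
  else if skiers.length = skis.length then partC skiers skis
  else if skis.length = 0 then 0
  else
    min (|skiers.getD (skiers.length - 1) 0 - skis.getD (skis.length - 1) 0| +
           recurDisparity (skiers.take (skiers.length - 1)) (skis.take (skis.length - 1)))
        (recurDisparity skiers (skis.take (skis.length - 1)))
termination_by skis.length
decreasing_by
  · simp only [List.length_take]; omega
  · simp only [List.length_take]; omega

-- ===== PORT B =====
-- inner loop of Source B: one in-place update of the band entry for offset t (v, u are the Python locals)
def bandStep (a : Int) (skis : List Int) (i : Nat) (p : Int × List Int) (t : Nat) : Int × List Int :=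
  let v := p.2.getD (t-1) 0 + |a - skis.getD (i-1+t) 0|
  let u := if v < p.1 then v else p.1
  (u, p.2.set (t-1) u)

-- one iteration of Source B's outer loop: state is (d, band)
def altStep (skis : List Int) (g : Nat) (st : Int × List Int) (i : Nat) (a : Int) : Int × List Int :=
  let d := st.1 + |a - skis.getD (i-1) 0|
  (d, ((List.range' 1 g).foldl (bandStep a skis i) (d, st.2)).2)

-- the `> length` arm is where Source B raises ValueError; outside Pre_.
def recurDisparity_alt (skiers : List Int) (skis : List Int) : Int :=
  if skiers.length > skis.length then 0
  else
    let g := skis.length - skiers.length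
    let st := (List.range' 1 skiers.length).foldl
      (fun st i => altStep skis g st i (skiers.getD (i-1) 0)) (0, List.replicate g 0)
    if g = 0 then st.1 else st.2.getD (g-1) 0

-- ===== PRECONDITION & SPEC =====
-- Pre_ excludes exactly the inputs with more skiers than skis, on which A raises IndexError (and B raises ValueError).
def Pre_recurDisparity (skiers : List Int) (skis : List Int) : Prop := skiers.length ≤ skis.length
instance (skiers : List Int) (skis : List Int) : Decidable (Pre_recurDisparity skiers skis) := by unfold Pre_recurDisparity; infer_instance
def pvWitness_recurDisparity : List Int × List Int := ([1, 5], [0, 2, 7])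

def Spec_recurDisparity (skiers : List Int) (skis : List Int) (out : Int) : Prop := out = recurDisparity_alt skiers skis
instance (skiers : List Int) (skis : List Int) (out : Int) : Decidable (Spec_recurDisparity skiers skis out) := by unfold Spec_recurDisparity; infer_instance

-- ===== CLAIM (what is proved, stated in full; the proofs are below) =====
def Claim_equal_recurDisparity : Prop := ∀ (skiers : List Int) (skis : List Int), Dom_recurDisparity skiers skis → Pre_recurDisparity skiers skis → Spec_recurDisparity skiers skis (recurDisparity skiers skis)

-- ===== LEMMAS AND PROOFS =====

-- prefix-sum of pairwise disparities (the value of partC on equal-length prefixes)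
def pvS (skiers skis : List Int) (i : Nat) : Int :=
  (List.range i).foldl (fun d k => d + |skiers.getD k 0 - skis.getD k 0|) 0

lemma getD_take_lt {xs : List Int} {i k : Nat} (h : k < i) :
    (xs.take i).getD k 0 = xs.getD k 0 := by
  simp [List.getD_eq_getElem?_getD, h]

lemma partC_take (skiers skis : List Int) (i : Nat) (hn : i ≤ skiers.length) (hm : i ≤ skis.length) :
    partC (skiers.take i) (skis.take i) = pvS skiers skis i := by
  have h1 : (skiers.take i).length = i := by simp; omega
  have h2 : (skis.take i).length = i := by simp; omega
  unfold partC pvS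
  rw [if_neg (by omega), h1]
  apply PySem.List.foldl_congr_mem
  intro acc k hk
  have : k < i := List.mem_range.mp hk
  rw [getD_take_lt this, getD_take_lt this]

lemma pvS_succ (skiers skis : List Int) (i : Nat) :
    pvS skiers skis (i+1) = pvS skiers skis i + |skiers.getD i 0 - skis.getD i 0| := by
  unfold pvS; rw [List.range_succ, List.foldl_append]; simp

-- A on equal-length prefixes
lemma A_diag (skiers skis : List Int) (i : Nat) (hn : i ≤ skiers.length) (hm : i ≤ skis.length) :
    recurDisparity (skiers.take i) (skis.take i) = pvS skiers skis i := by
  have h1 : (skiers.take i).length = i := by simp; omega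
  have h2 : (skis.take i).length = i := by simp; omega
  rcases Nat.eq_zero_or_pos i with h | h
  · subst h; simp [recurDisparity, pvS]
  · rw [recurDisparity, if_neg (by omega), if_pos (by omega)]
    exact partC_take skiers skis i hn hm

-- A's recurrence for i < j
lemma A_lt (skiers skis : List Int) (i j : Nat) (h1 : 1 ≤ i) (h2 : i < j)
    (hn : i ≤ skiers.length) (hm : j ≤ skis.length) :
    recurDisparity (skiers.take i) (skis.take j) =
      min (|skiers.getD (i-1) 0 - skis.getD (j-1) 0| +
            recurDisparity (skiers.take (i-1)) (skis.take (j-1)))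
          (recurDisparity (skiers.take i) (skis.take (j-1))) := by
  have hi : (skiers.take i).length = i := by simp; omega
  have hj : (skis.take j).length = j := by simp; omega
  rw [recurDisparity, hi, hj, if_neg (by omega), if_neg (by omega), if_neg (by omega)]
  rw [List.take_take, List.take_take]
  have e1 : min (i-1) i = i - 1 := by omega
  have e2 : min (j-1) j = j - 1 := by omega
  rw [e1, e2, getD_take_lt (by omega), getD_take_lt (by omega)]

lemma getD_set_self {l : List Int} {n : Nat} {a : Int} (h : n < l.length) :
    (l.set n a).getD n 0 = a := by
  simp [List.getD_eq_getElem?_getD, h]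

lemma getD_set_ne {l : List Int} {n k : Nat} {a : Int} (h : n ≠ k) :
    (l.set n a).getD k 0 = l.getD k 0 := by
  simp [List.getD_eq_getElem?_getD, List.getElem?_set_ne h]

-- invariant of Source B's inner (band) loop: entries below s are already row i, entries from s on are still row i-1
lemma inner_inv (skiers skis : List Int) (i g : Nat)
    (hi1 : 1 ≤ i) (hin : i ≤ skiers.length) (him : i + g ≤ skis.length) :
    ∀ (k s : Nat) (u : Int) (band : List Int),
      s + k = g + 1 → 1 ≤ s → band.length = g →
      u = recurDisparity (skiers.take i) (skis.take (i + (s-1))) →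
      (∀ t, 1 ≤ t → t ≤ s - 1 → band.getD (t-1) 0 = recurDisparity (skiers.take i) (skis.take (i+t))) →
      (∀ t, s ≤ t → t ≤ g → band.getD (t-1) 0 = recurDisparity (skiers.take (i-1)) (skis.take (i-1+t))) →
      ((List.range' s k).foldl (bandStep (skiers.getD (i-1) 0) skis i) (u, band)).2.length = g ∧
      ∀ t, 1 ≤ t → t ≤ g →
        ((List.range' s k).foldl (bandStep (skiers.getD (i-1) 0) skis i) (u, band)).2.getD (t-1) 0
          = recurDisparity (skiers.take i) (skis.take (i+t)) := by
  intro k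
  induction k with
  | zero =>
    intro s u band hs hs1 hlen hu hnew hold
    rw [List.range'_zero, List.foldl_nil]
    exact ⟨hlen, fun t ht1 htg => hnew t ht1 (by omega)⟩
  | succ k ih =>
    intro s u band hs hs1 hlen hu hnew hold
    rw [List.range'_succ, List.foldl_cons]
    have hsg : s ≤ g := by omega
    have hv : band.getD (s-1) 0 = recurDisparity (skiers.take (i-1)) (skis.take (i-1+s)) :=
      hold s (le_refl s) hsg
    -- the freshly written entry is dp[i][i+s]
    have hstep : (if band.getD (s-1) 0 + |skiers.getD (i-1) 0 - skis.getD (i-1+s) 0| < u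
                  then band.getD (s-1) 0 + |skiers.getD (i-1) 0 - skis.getD (i-1+s) 0| else u)
        = recurDisparity (skiers.take i) (skis.take (i+s)) := by
      rw [A_lt skiers skis i (i+s) hi1 (by omega) hin (by omega), hv, hu]
      have e1 : i + s - 1 = i - 1 + s := by omega
      have e2 : i + (s - 1) = i + s - 1 := by omega
      rw [e1, e2, e1]
      rcases lt_or_ge (recurDisparity (skiers.take (i-1)) (skis.take (i-1+s)) +
          |skiers.getD (i-1) 0 - skis.getD (i-1+s) 0|)
          (recurDisparity (skiers.take i) (skis.take (i-1+s))) with h | h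
      · rw [if_pos (by omega)]; omega
      · rw [if_neg (by omega)]; omega
    apply ih (s+1) _ _ (by omega) (by omega) (by simp [hlen])
    · show _ = recurDisparity (skiers.take i) (skis.take (i + (s+1-1)))
      have e : s + 1 - 1 = s := by omega
      rw [e]
      simpa [bandStep] using hstep
    · intro t ht1 hts
      by_cases hts' : t = s
      · subst hts'
        show ((band.set (t-1) _).getD (t-1) 0) = _
        rw [getD_set_self (by omega)]
        simpa [bandStep] using hstep
      · show ((band.set (s-1) _).getD (t-1) 0) = _
        rw [getD_set_ne (by omega)]
        exact hnew t ht1 (by omega)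
    · intro t hts htg
      show ((band.set (s-1) _).getD (t-1) 0) = _
      rw [getD_set_ne (by omega)]
      exact hold t (by omega) htg

-- invariant of Source B's outer loop: after skiers 1..s-1, d = dp[s-1][s-1] and band holds dp[s-1][s-1+t]
lemma outer_inv (skiers skis : List Int) (g : Nat) (hg : skiers.length + g = skis.length) :
    ∀ (k s : Nat) (d : Int) (band : List Int),
      s + k = skiers.length + 1 → 1 ≤ s → band.length = g →
      d = recurDisparity (skiers.take (s-1)) (skis.take (s-1)) →
      (∀ t, 1 ≤ t → t ≤ g → band.getD (t-1) 0 = recurDisparity (skiers.take (s-1)) (skis.take (s-1+t))) →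
      ((List.range' s k).foldl (fun st i => altStep skis g st i (skiers.getD (i-1) 0)) (d, band)).1
          = recurDisparity (skiers.take skiers.length) (skis.take skiers.length) ∧
      ∀ t, 1 ≤ t → t ≤ g →
        ((List.range' s k).foldl (fun st i => altStep skis g st i (skiers.getD (i-1) 0)) (d, band)).2.getD (t-1) 0
          = recurDisparity (skiers.take skiers.length) (skis.take (skiers.length + t)) := by
  intro k
  induction k with
  | zero =>
    intro s d band hs hs1 hlen hd hband
    have e : s - 1 = skiers.length := by omega
    rw [List.range'_zero, List.foldl_nil]
    rw [e] at hd hband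
    exact ⟨hd, hband⟩
  | succ k ih =>
    intro s d band hs hs1 hlen hd hband
    rw [List.range'_succ, List.foldl_cons]
    have hsn : s ≤ skiers.length := by omega
    have hd' : d + |skiers.getD (s-1) 0 - skis.getD (s-1) 0|
        = recurDisparity (skiers.take s) (skis.take s) := by
      rw [hd, A_diag skiers skis (s-1) (by omega) (by omega), A_diag skiers skis s hsn (by omega)]
      have e : s = (s-1) + 1 := by omega
      rw [e, pvS_succ]
      have e2 : s - 1 + 1 - 1 = s - 1 := by omega
      rw [e2]
    obtain ⟨hil, hirow⟩ := inner_inv skiers skis s g hs1 hsn (by omega) g 1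
      (d + |skiers.getD (s-1) 0 - skis.getD (s-1) 0|) band (by omega) (by omega) hlen
      (by simpa using hd') (by intro t _ ht0; omega)
      (by intro t ht1 htg
          have e : s - 1 + t = s - 1 + t := rfl
          exact hband t ht1 htg)
    apply ih (s+1)
    · omega
    · omega
    · show (altStep skis g (d, band) s (skiers.getD (s-1) 0)).2.length = g
      simpa [altStep] using hil
    · show (altStep skis g (d, band) s (skiers.getD (s-1) 0)).1 = _
      have e : s + 1 - 1 = s := by omega
      rw [e]
      simpa [altStep] using hd'
    · intro t ht1 htg
      show (altStep skis g (d, band) s (skiers.getD (s-1) 0)).2.getD (t-1) 0 = _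
      have e : s + 1 - 1 = s := by omega
      rw [e]
      have := hirow t ht1 htg
      simpa [altStep] using this

-- ===== VERDICT (by name: the statement is the Claim_ definition above) =====
theorem recurDisparity_spec : Claim_equal_recurDisparity := by
  intro skiers skis _ hpre
  unfold Pre_recurDisparity at hpre
  unfold Spec_recurDisparity recurDisparity_alt
  rw [if_neg (by omega)]
  have hg : skiers.length + (skis.length - skiers.length) = skis.length := by omega
  have base : ∀ t, 1 ≤ t → t ≤ skis.length - skiers.length →
      (List.replicate (skis.length - skiers.length) (0:Int)).getD (t-1) 0
        = recurDisparity (skiers.take (1-1)) (skis.take (1-1+t)) := by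
    intro t ht1 htg
    rw [List.take_zero]
    simp [List.getD_eq_getElem?_getD, recurDisparity]
  obtain ⟨hd, hband⟩ := outer_inv skiers skis (skis.length - skiers.length) hg
    skiers.length 1 0 (List.replicate (skis.length - skiers.length) 0)
    (by omega) (by omega) (by simp)
    (by rw [List.take_zero, List.take_zero]; simp [recurDisparity]) base
  by_cases hzero : skis.length - skiers.length = 0
  · rw [if_pos hzero, hd, List.take_length]
    have e : skiers.length = skis.length := by omega
    rw [e, List.take_length]
  · rw [if_neg hzero]
    have := hband (skis.length - skiers.length) (by omega) (le_refl _)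
    rw [this, List.take_length, hg, List.take_length]
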